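-- pv_equiv track=rewrite | github.com/Ayesha-Majeed/Rail-and-Road-Auction | DesktopApp/column_cropper.py | find_all_gaps
-- ===== SOURCE A (Python) =====
-- def find_all_gaps(boxes: list) -> list:
--     if len(boxes) < 2:
--         return []
--
--     sorted_boxes    = sorted(boxes, key=lambda b: (b["x1"] + b["x2"]) / 2)
--     clusters        = []
--     current_cluster = [sorted_boxes[0]]
--     current_max_x2  = sorted_boxes[0]["x2"]
--
--     for b in sorted_boxes[1:]:
--         if b["x1"] <= current_max_x2:
--             current_cluster.append(b)
--             current_max_x2 = max(current_max_x2, b["x2"])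
--         else:
--             clusters.append(current_cluster)
--             current_cluster = [b]
--             current_max_x2  = b["x2"]
--     clusters.append(current_cluster)
--
--     if len(clusters) < 2:
--         return []
--
--     gaps = []
--     for i in range(len(clusters) - 1):
--         gap_start = max(b["x2"] for b in clusters[i])
--         gap_end   = min(b["x1"] for b in clusters[i + 1])
--         if gap_start < gap_end:
--             gaps.append({"start": gap_start, "end": gap_end})
--     return gaps
-- ===== SOURCE B (Python) =====
-- def find_all_gaps(boxes: list) -> list:
--     if len(boxes) < 2:
--         return []
--     # integer sum x1+x2 orders identically to the float midpoint (halving is monotone)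
--     first, *rest = sorted(boxes, key=lambda b: b["x1"] + b["x2"])
--     gaps = []
--     pending = None                     # max_x2 of the cluster just before the current one
--     mn, mx = first["x1"], first["x2"]  # aggregates of the current cluster
--     for b in rest:
--         if b["x1"] <= mx:
--             mn = min(mn, b["x1"])
--             mx = max(mx, b["x2"])
--         else:
--             if pending is not None and pending < mn:
--                 gaps.append({"start": pending, "end": mn})
--             pending, mn, mx = mx, b["x1"], b["x2"]
--     if pending is not None and pending < mn:
--         gaps.append({"start": pending, "end": mn})
--     return gaps
-- ===== Notes on version B (the rewrite author's own statement) =====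
-- stated objective: simpler
-- what changed: B is a single online pass that emits each gap the moment its right cluster closes, keeping only three scalars (previous cluster's max x2, current min x1, current max x2): A's clusters-of-box-lists, its per-cluster max/min rescanning loop and any intermediate cluster/aggregate list all disappear.
import Mathlib
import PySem

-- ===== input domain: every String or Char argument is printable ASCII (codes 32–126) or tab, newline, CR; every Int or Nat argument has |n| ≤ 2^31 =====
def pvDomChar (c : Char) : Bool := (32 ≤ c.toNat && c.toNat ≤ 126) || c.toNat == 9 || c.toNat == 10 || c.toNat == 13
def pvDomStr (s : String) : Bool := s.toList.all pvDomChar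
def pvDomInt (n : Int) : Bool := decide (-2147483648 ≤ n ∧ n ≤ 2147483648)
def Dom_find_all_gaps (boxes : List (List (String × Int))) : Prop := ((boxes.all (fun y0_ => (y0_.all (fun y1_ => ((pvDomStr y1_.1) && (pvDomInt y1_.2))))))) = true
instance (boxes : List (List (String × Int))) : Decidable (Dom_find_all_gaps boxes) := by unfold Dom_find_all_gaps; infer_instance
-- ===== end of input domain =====

-- B replaces A's two-phase clusters-of-lists + rescanning-loop scheme with one online pass
-- that emits each gap as its right cluster closes, keeping only three scalars; objective: simpler.

-- ===== PORT A =====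

-- b["k"] for a dict modelled as an association list; Pre_ guarantees the key is present,
-- so the .getD 0 default is never the value used.
def pvGetK (b : List (String × Int)) (k : String) : Int :=
  ((PySem.Dict.mk b).get? k).getD 0

-- Python sorts by (b["x1"]+b["x2"])/2, an exactly-represented float on Dom (|sum| ≤ 2^32);
-- halving is strictly monotone, so sorting by the integer sum x1+x2 gives the identical order.
def pvKey (b : List (String × Int)) : Int := pvGetK b "x1" + pvGetK b "x2"

-- max(b["x2"] for b in c) / min(b["x1"] for b in c): first element seeds the reduction.
def pvMaxX2 (c : List (List (String × Int))) : Int :=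
  match c with
  | [] => 0
  | b :: t => t.foldl (fun m x => max m (pvGetK x "x2")) (pvGetK b "x2")

def pvMinX1 (c : List (List (String × Int))) : Int :=
  match c with
  | [] => 0
  | b :: t => t.foldl (fun m x => min m (pvGetK x "x1")) (pvGetK b "x1")

-- the clustering for-loop of A, with the trailing clusters.append(current_cluster)
def pvClusterLoop (rest : List (List (String × Int)))
    (clusters : List (List (List (String × Int))))
    (cur : List (List (String × Int))) (curMax : Int) :
    List (List (List (String × Int))) :=
  match rest with
  | [] => clusters ++ [cur]
  | b :: rs =>
    if pvGetK b "x1" ≤ curMax then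
      pvClusterLoop rs clusters (cur ++ [b]) (max curMax (pvGetK b "x2"))
    else
      pvClusterLoop rs (clusters ++ [cur]) [b] (pvGetK b "x2")

-- for i in range(len(clusters)-1): rescan each pair of adjacent clusters
def pvGapLoop (cs : List (List (List (String × Int)))) : List (List (String × Int)) :=
  match cs with
  | c1 :: c2 :: r =>
    (if pvMaxX2 c1 < pvMinX1 c2
     then [[("start", pvMaxX2 c1), ("end", pvMinX1 c2)]] else []) ++ pvGapLoop (c2 :: r)
  | _ => []

def find_all_gaps (boxes : List (List (String × Int))) : List (List (String × Int)) :=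
  if boxes.length < 2 then []
  else
    match PySem.List.sorted boxes pvKey false with
    | [] => []  -- unreachable: boxes has ≥ 2 elements
    | b0 :: rest =>
      let clusters := pvClusterLoop rest [] [b0] (pvGetK b0 "x2")
      if clusters.length < 2 then [] else pvGapLoop clusters

-- ===== PORT B =====

-- the 'if pending is not None and pending < mn: gaps.append(...)' emission of B
def pvEmit (pending : Option Int) (mn : Int) : List (List (String × Int)) :=
  match pending with
  | none => []
  | some p => if p < mn then [[("start", p), ("end", mn)]] else []

-- the single online for-loop of B over the tail of the sorted list
def pvOnline (bs : List (List (String × Int))) (gaps : List (List (String × Int)))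
    (pending : Option Int) (mn mx : Int) : List (List (String × Int)) :=
  match bs with
  | [] => gaps ++ pvEmit pending mn
  | b :: rs =>
    if pvGetK b "x1" ≤ mx then
      pvOnline rs gaps pending (min mn (pvGetK b "x1")) (max mx (pvGetK b "x2"))
    else
      pvOnline rs (gaps ++ pvEmit pending mn) (some mx) (pvGetK b "x1") (pvGetK b "x2")

def find_all_gaps_alt (boxes : List (List (String × Int))) : List (List (String × Int)) :=
  if boxes.length < 2 then []
  else
    match PySem.List.sorted boxes pvKey false with
    | [] => []  -- unreachable
    | b0 :: rest => pvOnline rest [] none (pvGetK b0 "x1") (pvGetK b0 "x2")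

-- ===== PRECONDITION & SPEC =====
-- Pre_ excludes (when ≥ 2 boxes, i.e. when the keys are looked up at all) boxes missing the
-- "x1"/"x2" key, on which A raises KeyError, and boxes
-- whose association list repeats a key, on which the list model of a Python dict is ambiguous.
def Pre_find_all_gaps (boxes : List (List (String × Int))) : Prop :=
  2 ≤ boxes.length → ∀ b ∈ boxes, (b.map Prod.fst).Nodup ∧ "x1" ∈ b.map Prod.fst ∧ "x2" ∈ b.map Prod.fst
instance (boxes : List (List (String × Int))) : Decidable (Pre_find_all_gaps boxes) := by
  unfold Pre_find_all_gaps; infer_instance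

def pvWitness_find_all_gaps : (List (List (String × Int))) :=
  [[("x1", 0), ("x2", 1)], [("x1", 5), ("x2", 6)]]

def Spec_find_all_gaps (boxes : List (List (String × Int))) (out : List (List (String × Int))) : Prop := out = find_all_gaps_alt boxes
instance (boxes : List (List (String × Int))) (out : List (List (String × Int))) : Decidable (Spec_find_all_gaps boxes out) := by unfold Spec_find_all_gaps; infer_instance

-- ===== CLAIM (what is proved, stated in full; the proofs are below) =====
def Claim_equal_find_all_gaps : Prop := ∀ (boxes : List (List (String × Int))), Dom_find_all_gaps boxes → Pre_find_all_gaps boxes → Spec_find_all_gaps boxes (find_all_gaps boxes)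

-- ===== LEMMAS AND PROOFS =====

-- the gaps A's rescanning loop produces on a cluster list, threaded with the max x2 of
-- the cluster to the left (none for the first cluster)
def pvGp (pending : Option Int) (cs : List (List (List (String × Int)))) :
    List (List (String × Int)) :=
  match cs with
  | [] => []
  | c :: r => pvEmit pending (pvMinX1 c) ++ pvGp (some (pvMaxX2 c)) r

theorem pvMaxX2_append (c : List (List (String × Int))) (b : List (String × Int))
    (hc : c ≠ []) : pvMaxX2 (c ++ [b]) = max (pvMaxX2 c) (pvGetK b "x2") := by
  cases c with
  | nil => exact absurd rfl hc
  | cons h t => simp [pvMaxX2, List.foldl_append]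

theorem pvMinX1_append (c : List (List (String × Int))) (b : List (String × Int))
    (hc : c ≠ []) : pvMinX1 (c ++ [b]) = min (pvMinX1 c) (pvGetK b "x1") := by
  cases c with
  | nil => exact absurd rfl hc
  | cons h t => simp [pvMinX1, List.foldl_append]

-- accumulator of A's clustering loop distributes
theorem pvClusterLoop_acc (rest : List (List (String × Int)))
    (clusters : List (List (List (String × Int))))
    (cur : List (List (String × Int))) (m : Int) :
    pvClusterLoop rest clusters cur m = clusters ++ pvClusterLoop rest [] cur m := by
  induction rest generalizing clusters cur m with
  | nil => simp only [pvClusterLoop, List.nil_append]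
  | cons b rs ih =>
    by_cases h : pvGetK b "x1" ≤ m
    · simp only [pvClusterLoop, h, if_true]
      exact ih clusters (cur ++ [b]) _
    · simp only [pvClusterLoop, h, if_false, List.nil_append]
      rw [ih (clusters ++ [cur]) [b], ih [cur] [b]]
      simp

-- the clustering loop always returns a nonempty list
theorem pvClusterLoop_ne_nil (rest : List (List (String × Int)))
    (clusters : List (List (List (String × Int))))
    (cur : List (List (String × Int))) (m : Int) :
    pvClusterLoop rest clusters cur m ≠ [] := by
  induction rest generalizing clusters cur m with
  | nil => simp [pvClusterLoop]
  | cons b rs ih =>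
    by_cases h : pvGetK b "x1" ≤ m
    · simp only [pvClusterLoop, h, if_true]; exact ih _ _ _
    · simp only [pvClusterLoop, h, if_false]; exact ih _ _ _

-- invariant: B's online pass computes the threaded gap fold over A's clusters
theorem pvOnline_inv (rest : List (List (String × Int)))
    (gaps : List (List (String × Int))) (pending : Option Int)
    (cur : List (List (String × Int))) (hcur : cur ≠ []) :
    pvOnline rest gaps pending (pvMinX1 cur) (pvMaxX2 cur)
      = gaps ++ pvGp pending (pvClusterLoop rest [] cur (pvMaxX2 cur)) := by
  induction rest generalizing gaps pending cur with
  | nil => simp [pvOnline, pvClusterLoop, pvGp]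
  | cons b rs ih =>
    by_cases h : pvGetK b "x1" ≤ pvMaxX2 cur
    · have h1 := pvMinX1_append cur b hcur
      have h2 := pvMaxX2_append cur b hcur
      have := ih gaps pending (cur ++ [b]) (by simp)
      rw [h1, h2] at this
      simpa [pvOnline, pvClusterLoop, h] using this
    · have this := ih (gaps ++ pvEmit pending (pvMinX1 cur)) (some (pvMaxX2 cur)) [b] (by simp)
      have e1 : pvMinX1 [b] = pvGetK b "x1" := rfl
      have e2 : pvMaxX2 [b] = pvGetK b "x2" := rfl
      rw [e1, e2] at this
      rw [show pvClusterLoop (b :: rs) [] cur (pvMaxX2 cur)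
            = [cur] ++ pvClusterLoop rs [] [b] (pvGetK b "x2") by
            simp only [pvClusterLoop, h, if_false, List.nil_append]
            simpa using pvClusterLoop_acc rs [cur] [b] (pvGetK b "x2")]
      simp only [pvOnline, h, if_false]
      rw [this]
      simp [pvGp]

-- the threaded fold with a known left max equals A's rescanning loop
theorem pvGp_some (r : List (List (List (String × Int)))) (c : List (List (String × Int))) :
    pvGp (some (pvMaxX2 c)) r = pvGapLoop (c :: r) := by
  induction r generalizing c with
  | nil => simp [pvGp, pvGapLoop]
  | cons c2 r' ih =>
    simp only [pvGp, pvEmit, pvGapLoop, ih c2]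

theorem pvGp_none (cs : List (List (List (String × Int)))) :
    pvGp none cs = pvGapLoop cs := by
  cases cs with
  | nil => rfl
  | cons c r => simp [pvGp, pvEmit, pvGp_some r c]

-- ===== VERDICT (by name: the statement is the Claim_ definition above) =====
theorem find_all_gaps_spec : Claim_equal_find_all_gaps := by
  intro boxes _ _
  unfold Spec_find_all_gaps find_all_gaps find_all_gaps_alt
  by_cases hlen : boxes.length < 2
  · simp [hlen]
  · simp only [hlen, if_false]
    cases hs : PySem.List.sorted boxes pvKey false with
    | nil =>
      rw [PySem.List.sorted_eq_nil_iff] at hs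
    | cons b0 rest =>
      dsimp only
      have hinv := pvOnline_inv rest [] none [b0] (by simp)
      have e1 : pvMinX1 [b0] = pvGetK b0 "x1" := rfl
      have e2 : pvMaxX2 [b0] = pvGetK b0 "x2" := rfl
      rw [e1, e2, List.nil_append] at hinv
      rw [hinv]
      rcases hcs : pvClusterLoop rest [] [b0] (pvGetK b0 "x2") with _ | ⟨c, _ | ⟨c2, t⟩⟩
      · exact absurd hcs (pvClusterLoop_ne_nil _ _ _ _)
      · simp [pvGp, pvEmit]
      · simp only [List.length_cons, pvGp_none]
        have : ¬ (t.length + 1 + 1 < 2) := by omega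
        simp [this]
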